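-- pv_equiv track=rewrite | github.com/sparban/busqueda-tabu | busqueda_tabu_final.py | unimodalNoSeparable
-- ===== SOURCE A (Python) =====
-- def unimodalNoSeparable(s, contEvaluacion):
--     # cv: varaible de control
--     cv = 0
--     y =0
--     contEvaluacion += 1
--     for i in range(len(s)):
--         cv = (s[i]+cv)
--         y = cv*cv + y
--
--     return (y, contEvaluacion)
-- ===== SOURCE B (Python) =====
-- def unimodalNoSeparable(s, contEvaluacion):
--     # Phase 1: build the list of prefix sums.
--     prefixes = []
--     c = 0
--     for x in s:
--         c = c + x
--         prefixes.append(c)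
--     # Phase 2: sum the squares of the prefix sums.
--     total = 0
--     for v in prefixes:
--         total = total + v * v
--     return (total, contEvaluacion + 1)
-- ===== Notes on version B (the rewrite author's own statement) =====
-- stated objective: alternative
-- what changed: The single fused loop that keeps a running prefix sum and squares it in place is split into two separate passes: one loop builds the intermediate list of prefix sums, a second loop sums their squares.
import Mathlib
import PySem

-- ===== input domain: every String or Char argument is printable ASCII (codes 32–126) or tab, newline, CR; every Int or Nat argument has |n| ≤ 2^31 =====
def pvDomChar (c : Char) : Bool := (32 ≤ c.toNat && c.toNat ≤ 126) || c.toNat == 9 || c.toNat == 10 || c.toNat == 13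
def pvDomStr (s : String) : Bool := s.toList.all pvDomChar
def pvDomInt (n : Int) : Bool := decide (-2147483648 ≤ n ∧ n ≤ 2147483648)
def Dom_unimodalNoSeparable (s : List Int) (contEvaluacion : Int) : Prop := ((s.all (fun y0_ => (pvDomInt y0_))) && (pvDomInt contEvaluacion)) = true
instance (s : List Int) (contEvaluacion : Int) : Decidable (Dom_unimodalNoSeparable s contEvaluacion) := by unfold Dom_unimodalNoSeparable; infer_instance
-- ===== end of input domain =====

-- B splits A's fused running-sum-and-square loop into two passes: build the prefix-sum list, then sum its squares (alternative decomposition, same cost).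

-- ===== PORT A =====
-- for i in range(len(s)): cv = s[i]+cv; y = cv*cv + y   — fold over s carrying (cv, y)
def unimodalNoSeparable (s : List Int) (contEvaluacion : Int) : Int × Int :=
  let st := s.foldl (fun (acc : Int × Int) x => (x + acc.1, (x + acc.1) * (x + acc.1) + acc.2)) (0, 0)
  (st.2, contEvaluacion + 1)

-- ===== PORT B =====
-- phase 1 of Source B: the loop appending running sums to `prefixes`
def pvPrefixes (s : List Int) : List Int :=
  (s.foldl (fun (acc : List Int × Int) x => (acc.1 ++ [acc.2 + x], acc.2 + x)) ([], 0)).1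

def unimodalNoSeparable_alt (s : List Int) (contEvaluacion : Int) : Int × Int :=
  ((pvPrefixes s).foldl (fun t v => t + v * v) 0, contEvaluacion + 1)

-- ===== PRECONDITION & SPEC =====
def Spec_unimodalNoSeparable (s : List Int) (contEvaluacion : Int) (out : Int × Int) : Prop := out = unimodalNoSeparable_alt s contEvaluacion
instance (s : List Int) (contEvaluacion : Int) (out : Int × Int) : Decidable (Spec_unimodalNoSeparable s contEvaluacion out) := by unfold Spec_unimodalNoSeparable; infer_instance

-- ===== CLAIM (what is proved, stated in full; the proofs are below) =====
def Claim_equal_unimodalNoSeparable : Prop := ∀ (s : List Int) (contEvaluacion : Int), Dom_unimodalNoSeparable s contEvaluacion → Spec_unimodalNoSeparable s contEvaluacion (unimodalNoSeparable s contEvaluacion)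

-- ===== LEMMAS AND PROOFS =====

-- the prefix-builder fold factors through its list accumulator
theorem pvPrefixes_acc (s : List Int) (ps : List Int) (cv : Int) :
    (s.foldl (fun (acc : List Int × Int) x => (acc.1 ++ [acc.2 + x], acc.2 + x)) (ps, cv)).1
      = ps ++ (s.foldl (fun (acc : List Int × Int) x => (acc.1 ++ [acc.2 + x], acc.2 + x)) ([], cv)).1 := by
  induction s generalizing ps cv with
  | nil => simp
  | cons x xs ih =>
    simp only [List.foldl_cons, List.nil_append]
    rw [ih (ps ++ [cv + x]) (cv + x), ih [cv + x] (cv + x), List.append_assoc]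

-- A's fused fold equals summing squares over the prefix list built from cv
theorem fused_eq_twophase (s : List Int) (cv y : Int) :
    (s.foldl (fun (acc : Int × Int) x => (x + acc.1, (x + acc.1) * (x + acc.1) + acc.2)) (cv, y)).2
      = ((s.foldl (fun (acc : List Int × Int) x => (acc.1 ++ [acc.2 + x], acc.2 + x)) ([], cv)).1).foldl
          (fun t v => t + v * v) y := by
  induction s generalizing cv y with
  | nil => simp
  | cons x xs ih =>
    simp only [List.foldl_cons, List.nil_append]
    rw [ih (x + cv) ((x + cv) * (x + cv) + y), add_comm cv x, pvPrefixes_acc xs [x + cv] (x + cv)]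
    simp only [List.foldl_append, List.foldl_cons, List.foldl_nil]
    ring_nf

-- ===== VERDICT (by name: the statement is the Claim_ definition above) =====
theorem unimodalNoSeparable_spec : Claim_equal_unimodalNoSeparable := by
  intro s contEvaluacion _
  show _ = _
  unfold unimodalNoSeparable unimodalNoSeparable_alt pvPrefixes
  simp only []
  rw [fused_eq_twophase]
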